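-- pv_equiv track=rewrite | github.com/Woojung0618/algorithmSolve | Programmers/Lv3/블록이동하기.py | solution
-- ===== SOURCE A (Python) =====
-- from collections import deque
--
-- dx = [-1, 1, 0, 0]
--
-- dy = [0, 0, -1, 1]
--
-- def nextspots(board, pos, n):
--     nextspots = []
--     pos = list(pos)
--     x1, y1, x2, y2 = pos[0][0], pos[0][1], pos[1][0], pos[1][1]
--     for i in range(4):  # 상하좌우
--         nx1, ny1 = x1 + dx[i], y1 + dy[i]
--         nx2, ny2 = x2 + dx[i], y2 + dy[i]
--         if 0 <= nx1 < n and 0 <= nx2 < n and 0 <= ny1 < n and 0 <= ny2 < n: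
--             if board[nx1][ny1] == 0 and board[nx2][ny2] == 0:
--                 nextspots.append({(nx1, ny1), (nx2, ny2)})
--     if x1 == x2: # 가로 상태
--         for i in [-1, 1]:
--             if 0 <= x1+i < n and 0 <= x2+i < n:
--                 if board[x1+i][y1] == 0 and board[x2+i][y2] == 0:
--                     nextspots.append({(x1, y1), (x1+i, y1)})
--                     nextspots.append({(x2, y2), (x2+i, y2)})
--     elif y1 == y2: # 세로 상태
--         for i in [-1, 1]:
--             if 0 <= y1+i < n and 0 <= y2+i < n:
--                 if board[x1][y1+i] == 0 and board[x2][y2+i] == 0: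
--                     nextspots.append({(x1, y1), (x1, y1+i)})
--                     nextspots.append({(x2, y2), (x2, y2+i)})
--
--     return nextspots
--
-- def solution(board):
--     queue = deque()
--     n = len(board)
--     visit = []
--     start = {(0,0), (0,1)}
--     queue.append((start, 0))
--     visit.append(start)
--     while queue:
--         pos, count = queue.popleft()
--         if (n-1, n-1) in pos:
--             return count
--         for nextspot in nextspots(board, pos, n):
--             if nextspot not in visit:
--                 queue.append((nextspot, count+1))
--                 visit.append(nextspot)
--     return 0
-- ===== SOURCE B (Python) =====
-- def solution(board):
--     # Naive fixpoint ("relational image power") iteration: no queue and no frontier;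
--     # round k holds the whole set of states reachable in <= k moves, each round takes
--     # the image of the ENTIRE set, stopping at the first round containing the goal.
--     n = len(board)
--     goal = (n - 1, n - 1)
--
--     def free(x, y):
--         return 0 <= x < n and 0 <= y < n and board[x][y] == 0
--
--     def norm(a, b):
--         return (a, b) if a <= b else (b, a)
--
--     def neighbors(pos):
--         (x1, y1), (x2, y2) = pos
--         out = []
--         for ddx, ddy in ((-1, 0), (1, 0), (0, -1), (0, 1)):
--             if free(x1 + ddx, y1 + ddy) and free(x2 + ddx, y2 + ddy):
--                 out.append(((x1 + ddx, y1 + ddy), (x2 + ddx, y2 + ddy)))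
--         if x1 == x2:  # horizontal block: rotate around either cell
--             for r in (x1 - 1, x1 + 1):
--                 if free(r, y1) and free(r, y2):
--                     out.append(norm((x1, y1), (r, y1)))
--                     out.append(norm((x2, y2), (r, y2)))
--         elif y1 == y2:  # vertical block
--             for c in (y1 - 1, y1 + 1):
--                 if free(x1, c) and free(x2, c):
--                     out.append(norm((x1, y1), (x1, c)))
--                     out.append(norm((x2, y2), (x2, c)))
--         return out
--
--     reach = {((0, 0), (0, 1))}
--     k = 0
--     while True:
--         if any(goal in pos for pos in reach):
--             return k
--         nxt = set(reach)
--         for s in reach: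
--             for nb in neighbors(s):
--                 nxt.add(nb)
--         if len(nxt) == len(reach):
--             return 0  # closure reached, goal unreachable
--         reach = nxt
--         k += 1
-- ===== Notes on version B (the rewrite author's own statement) =====
-- stated objective: alternative
-- what changed: Replaces the deque-of-(state,count) BFS with a visited list by a naive fixpoint iteration: round k holds the whole set of states reachable within k moves, each round adds the relational image of the ENTIRE set (no queue, no frontier, no per-state counts) and stops at the first round whose set contains the goal, or returns 0 when the set stabilizes.
-- outside the precondition, e.g. on solution([[0, 0, 0], [1, 1, 1], [0, 0]]): A returns 0, B returns 0; on solution([[], [0, 0]]): A returns 1, B raises IndexError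
import Mathlib
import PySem

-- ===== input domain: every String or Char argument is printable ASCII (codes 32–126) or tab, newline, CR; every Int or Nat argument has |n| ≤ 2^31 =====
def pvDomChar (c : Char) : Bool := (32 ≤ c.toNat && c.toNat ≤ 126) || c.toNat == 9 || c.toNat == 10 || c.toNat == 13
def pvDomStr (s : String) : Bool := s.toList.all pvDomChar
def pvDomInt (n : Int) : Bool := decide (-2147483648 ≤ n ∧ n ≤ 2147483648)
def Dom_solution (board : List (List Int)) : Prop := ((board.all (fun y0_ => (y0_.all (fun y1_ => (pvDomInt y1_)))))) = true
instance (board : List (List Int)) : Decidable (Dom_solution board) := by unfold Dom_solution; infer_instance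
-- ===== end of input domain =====

-- B replaces A's deque BFS (per-state counts, visited list) by a naive fixpoint
-- iteration: round k holds the whole set of states reachable within k moves and each
-- round adds the relational image of the ENTIRE set; return values are proved equal.

-- A Python state is a 2-element set of cells {c1, c2}; both ports represent it by the
-- canonical (lexicographically sorted) pair of cells, so set equality = pair equality.
abbrev PvPos : Type := (Int × Int) × (Int × Int)

-- canonical representation of the 2-element set {a, b} (Python tuple order is lex)
def pvMk (a b : Int × Int) : PvPos :=
  if a.1 < b.1 ∨ (a.1 = b.1 ∧ a.2 ≤ b.2) then (a, b) else (b, a)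

-- board[x][y], totalized with pyGetD (all accesses are in bounds under Pre_solution
-- and the guards both Pythons test before indexing)
def pvAt (board : List (List Int)) (x y : Int) : Int :=
  PySem.List.pyGetD (PySem.List.pyGetD board x []) y 1

-- fuel bound shared by both ports (a totality guard only: enumerates all in-range
-- cell pairs; each loop makes progress on the visited/reached set, so it never runs out)
def pvCells (n : Int) : List (Int × Int) :=
  (PySem.List.pyRange 0 n 1).flatMap (fun x => (PySem.List.pyRange 0 n 1).map (fun y => (x, y)))
def pvAll (n : Int) : List PvPos :=
  (pvCells n).flatMap (fun a => (pvCells n).map (fun b => (a, b)))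

-- ===== PORT A =====
def pvDx : List Int := [-1, 1, 0, 0]
def pvDy : List Int := [0, 0, -1, 1]

def nextspotsA (board : List (List Int)) (pos : PvPos) (n : Int) : List PvPos :=
  let x1 := pos.1.1; let y1 := pos.1.2; let x2 := pos.2.1; let y2 := pos.2.2
  let ns := (PySem.List.pyRange 0 4 1).foldl (fun acc i =>
    let nx1 := x1 + PySem.List.pyGetD pvDx i 0
    let ny1 := y1 + PySem.List.pyGetD pvDy i 0
    let nx2 := x2 + PySem.List.pyGetD pvDx i 0
    let ny2 := y2 + PySem.List.pyGetD pvDy i 0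
    if 0 ≤ nx1 ∧ nx1 < n ∧ 0 ≤ nx2 ∧ nx2 < n ∧ 0 ≤ ny1 ∧ ny1 < n ∧ 0 ≤ ny2 ∧ ny2 < n then
      if pvAt board nx1 ny1 = 0 ∧ pvAt board nx2 ny2 = 0 then
        acc ++ [pvMk (nx1, ny1) (nx2, ny2)]
      else acc
    else acc) []
  if x1 = x2 then
    ([-1, 1] : List Int).foldl (fun acc i =>
      if 0 ≤ x1 + i ∧ x1 + i < n ∧ 0 ≤ x2 + i ∧ x2 + i < n then
        if pvAt board (x1 + i) y1 = 0 ∧ pvAt board (x2 + i) y2 = 0 then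
          acc ++ [pvMk (x1, y1) (x1 + i, y1), pvMk (x2, y2) (x2 + i, y2)]
        else acc
      else acc) ns
  else if y1 = y2 then
    ([-1, 1] : List Int).foldl (fun acc i =>
      if 0 ≤ y1 + i ∧ y1 + i < n ∧ 0 ≤ y2 + i ∧ y2 + i < n then
        if pvAt board x1 (y1 + i) = 0 ∧ pvAt board x2 (y2 + i) = 0 then
          acc ++ [pvMk (x1, y1) (x1, y1 + i), pvMk (x2, y2) (x2, y2 + i)]
        else acc
      else acc) ns
  else ns

-- the while loop, fuel = totality guard (never exhausted: ≥ 2·|pvAll| + 2 pops suffice)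
def loopA (board : List (List Int)) (n : Int) :
    Nat → List (PvPos × Int) → List PvPos → Int
  | 0, _, _ => 0
  | _ + 1, [], _ => 0
  | fuel + 1, (pos, count) :: rest, visit =>
    if pos.1 = (n - 1, n - 1) ∨ pos.2 = (n - 1, n - 1) then count
    else
      let st := (nextspotsA board pos n).foldl
        (fun (st : List (PvPos × Int) × List PvPos) ns =>
          if ns ∈ st.2 then st else (st.1 ++ [(ns, count + 1)], st.2 ++ [ns])) (rest, visit)
      loopA board n fuel st.1 st.2

def solution (board : List (List Int)) : Int :=
  let n : Int := board.length
  let start : PvPos := ((0, 0), (0, 1))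
  loopA board n (2 * (pvAll n).length + 2) [(start, 0)] [start]

-- ===== PORT B =====
def pvFree (board : List (List Int)) (n x y : Int) : Bool :=
  decide (0 ≤ x) && decide (x < n) && decide (0 ≤ y) && decide (y < n) && decide (pvAt board x y = 0)

def pvNorm (a b : Int × Int) : PvPos :=
  if a.1 < b.1 ∨ (a.1 = b.1 ∧ a.2 ≤ b.2) then (a, b) else (b, a)

def nextspotsB (board : List (List Int)) (pos : PvPos) (n : Int) : List PvPos :=
  let x1 := pos.1.1; let y1 := pos.1.2; let x2 := pos.2.1; let y2 := pos.2.2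
  let out := ([((-1 : Int), (0 : Int)), (1, 0), (0, -1), (0, 1)] : List (Int × Int)).foldl
    (fun out dd =>
      if pvFree board n (x1 + dd.1) (y1 + dd.2) && pvFree board n (x2 + dd.1) (y2 + dd.2) then
        out ++ [((x1 + dd.1, y1 + dd.2), (x2 + dd.1, y2 + dd.2))]
      else out) []
  if x1 = x2 then
    ([x1 - 1, x1 + 1] : List Int).foldl (fun out r =>
      if pvFree board n r y1 && pvFree board n r y2 then
        out ++ [pvNorm (x1, y1) (r, y1), pvNorm (x2, y2) (r, y2)]
      else out) out
  else if y1 = y2 then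
    ([y1 - 1, y1 + 1] : List Int).foldl (fun out c =>
      if pvFree board n x1 c && pvFree board n x2 c then
        out ++ [pvNorm (x1, y1) (x1, c), pvNorm (x2, y2) (x2, c)]
      else out) out
  else out

-- Source B's 'while True' fixpoint loop: reach = set of states reachable within k moves;
-- each round folds the image of the WHOLE set into a copy, stops on goal or stability
-- (fuel = totality guard only, never exhausted)
def loopC (board : List (List Int)) (n : Int) :
    Nat → PySem.Set PvPos → Int → Int
  | 0, _, _ => 0
  | fuel + 1, reach, k =>
    if reach.any (fun pos => decide (pos.1 = (n - 1, n - 1) ∨ pos.2 = (n - 1, n - 1))) then k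
    else
      let nxt := reach.foldl (fun (acc : PySem.Set PvPos) s =>
        (nextspotsB board s n).foldl (fun a nb => PySem.Set.add a nb) acc) reach
      if nxt.length = reach.length then 0
      else loopC board n fuel nxt (k + 1)

def solution_alt (board : List (List Int)) : Int :=
  let n : Int := board.length
  let start : PvPos := ((0, 0), (0, 1))
  loopC board n ((pvAll n).length + 2) (PySem.Set.ofList [start]) 0

-- ===== PRECONDITION & SPEC =====
-- Pre_ excludes boards with a row shorter than the side length (unless n ≤ 1, where no
-- cell is read): there Python A's list indexing can raise IndexError, and whether it
-- does depends on which cells the search happens to reach.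
def Pre_solution (board : List (List Int)) : Prop :=
  board.length ≤ 1 ∨ ∀ row ∈ board, board.length ≤ row.length
instance (board : List (List Int)) : Decidable (Pre_solution board) := by
  unfold Pre_solution; infer_instance

def pvWitness_solution : List (List Int) := [[0, 0], [0, 0]]

def Spec_solution (board : List (List Int)) (out : Int) : Prop := out = solution_alt board
instance (board : List (List Int)) (out : Int) : Decidable (Spec_solution board out) := by
  unfold Spec_solution; infer_instance

-- ===== CLAIM (what is proved, stated in full; the proofs are below) =====
def Claim_equal_solution : Prop := ∀ (board : List (List Int)), Dom_solution board → Pre_solution board → Spec_solution board (solution board)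

-- ===== LEMMAS AND PROOFS =====

-- goal test as a Bool predicate (the one loopC uses)
def pvIsGoal (n : Int) (p : PvPos) : Bool := decide (p.1 = (n - 1, n - 1) ∨ p.2 = (n - 1, n - 1))

-- the common "append if new" step on the visited list
def pvSbody (a : List PvPos × List PvPos) (ns : PvPos) : List PvPos × List PvPos :=
  if ns ∈ a.2 then a else (a.1 ++ [ns], a.2 ++ [ns])

def pvAdd (v : List PvPos) (x : PvPos) : List PvPos := if x ∈ v then v else v ++ [x]

def pvExpand (board : List (List Int)) (n : Int) (pend : List PvPos)
    (acc : List PvPos × List PvPos) : List PvPos × List PvPos :=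
  pend.foldl (fun a p => (nextspotsA board p n).foldl pvSbody a) acc

-- one round of B: fold the image of one state into the accumulated set
def pvStep (board : List (List Int)) (n : Int) (v : List PvPos) (s : PvPos) : List PvPos :=
  (nextspotsA board s n).foldl pvAdd v

-- a state is in range and canonically ordered
def pvOk (n : Int) (p : PvPos) : Prop :=
  (0 ≤ p.1.1 ∧ p.1.1 < n ∧ 0 ≤ p.1.2 ∧ p.1.2 < n ∧
   0 ≤ p.2.1 ∧ p.2.1 < n ∧ 0 ≤ p.2.2 ∧ p.2.2 < n) ∧ pvMk p.1 p.2 = p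

def pvMissing (n : Int) (visit : List PvPos) : Nat :=
  ((pvAll n).filter (fun x => decide (x ∉ visit))).length

-- explicit value of one translation attempt of A (direction d = (dx, dy))
def pvTA (board : List (List Int)) (n : Int) (pos : PvPos) (d : Int × Int) : List PvPos :=
  if 0 ≤ pos.1.1 + d.1 ∧ pos.1.1 + d.1 < n ∧ 0 ≤ pos.2.1 + d.1 ∧ pos.2.1 + d.1 < n ∧
     0 ≤ pos.1.2 + d.2 ∧ pos.1.2 + d.2 < n ∧ 0 ≤ pos.2.2 + d.2 ∧ pos.2.2 + d.2 < n then
    if pvAt board (pos.1.1 + d.1) (pos.1.2 + d.2) = 0 ∧ pvAt board (pos.2.1 + d.1) (pos.2.2 + d.2) = 0 then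
      [pvMk (pos.1.1 + d.1, pos.1.2 + d.2) (pos.2.1 + d.1, pos.2.2 + d.2)]
    else []
  else []

-- explicit value of one rotation attempt of A in the horizontal / vertical branch
def pvRH (board : List (List Int)) (n : Int) (pos : PvPos) (i : Int) : List PvPos :=
  if 0 ≤ pos.1.1 + i ∧ pos.1.1 + i < n ∧ 0 ≤ pos.2.1 + i ∧ pos.2.1 + i < n then
    if pvAt board (pos.1.1 + i) pos.1.2 = 0 ∧ pvAt board (pos.2.1 + i) pos.2.2 = 0 then
      [pvMk pos.1 (pos.1.1 + i, pos.1.2), pvMk pos.2 (pos.2.1 + i, pos.2.2)]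
    else []
  else []

def pvRV (board : List (List Int)) (n : Int) (pos : PvPos) (i : Int) : List PvPos :=
  if 0 ≤ pos.1.2 + i ∧ pos.1.2 + i < n ∧ 0 ≤ pos.2.2 + i ∧ pos.2.2 + i < n then
    if pvAt board pos.1.1 (pos.1.2 + i) = 0 ∧ pvAt board pos.2.1 (pos.2.2 + i) = 0 then
      [pvMk pos.1 (pos.1.1, pos.1.2 + i), pvMk pos.2 (pos.2.1, pos.2.2 + i)]
    else []
  else []

def pvNbrs (board : List (List Int)) (n : Int) (pos : PvPos) : List PvPos :=
  (pvTA board n pos (-1, 0) ++ pvTA board n pos (1, 0) ++ pvTA board n pos (0, -1) ++ pvTA board n pos (0, 1)) ++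
  (if pos.1.1 = pos.2.1 then pvRH board n pos (-1) ++ pvRH board n pos 1
   else if pos.1.2 = pos.2.2 then pvRV board n pos (-1) ++ pvRV board n pos 1 else [])

theorem pvRange4 : PySem.List.pyRange 0 4 1 = [0, 1, 2, 3] := by decide

theorem ite_acc {c c' : Prop} [Decidable c] [Decidable c'] (acc l : List PvPos) :
    (if c then (if c' then acc ++ l else acc) else acc) = acc ++ (if c then (if c' then l else []) else []) := by
  split_ifs <;> simp

theorem pvDx0 : PySem.List.pyGetD pvDx 0 0 = -1 := by decide
theorem pvDx1 : PySem.List.pyGetD pvDx 1 0 = 1 := by decide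
theorem pvDx2 : PySem.List.pyGetD pvDx 2 0 = 0 := by decide
theorem pvDx3 : PySem.List.pyGetD pvDx 3 0 = 0 := by decide
theorem pvDy0 : PySem.List.pyGetD pvDy 0 0 = 0 := by decide
theorem pvDy1 : PySem.List.pyGetD pvDy 1 0 = 0 := by decide
theorem pvDy2 : PySem.List.pyGetD pvDy 2 0 = -1 := by decide
theorem pvDy3 : PySem.List.pyGetD pvDy 3 0 = 1 := by decide

theorem ite_acc1 {c : Prop} [Decidable c] (acc l : List PvPos) :
    (if c then acc ++ l else acc) = acc ++ (if c then l else []) := by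
  split_ifs <;> simp

theorem nextspotsA_eq_nbrs (board : List (List Int)) (n : Int) (pos : PvPos) :
    nextspotsA board pos n = pvNbrs board n pos := by
  unfold nextspotsA pvNbrs pvTA pvRH pvRV
  rw [pvRange4]
  simp only [List.foldl_cons, List.foldl_nil, pvDx0, pvDx1, pvDx2, pvDx3, pvDy0, pvDy1, pvDy2,
    pvDy3, ite_acc]
  by_cases hx : pos.1.1 = pos.2.1
  · rw [if_pos hx, if_pos hx]
    simp [List.append_assoc]
  · rw [if_neg hx, if_neg hx]
    by_cases hy : pos.1.2 = pos.2.2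
    · rw [if_pos hy, if_pos hy]
      simp [List.append_assoc]
    · rw [if_neg hy, if_neg hy]
      simp [List.append_assoc]

-- B-side pieces
def pvTB (board : List (List Int)) (n : Int) (pos : PvPos) (d : Int × Int) : List PvPos :=
  if pvFree board n (pos.1.1 + d.1) (pos.1.2 + d.2) && pvFree board n (pos.2.1 + d.1) (pos.2.2 + d.2) then
    [((pos.1.1 + d.1, pos.1.2 + d.2), (pos.2.1 + d.1, pos.2.2 + d.2))]
  else []

def pvRHB (board : List (List Int)) (n : Int) (pos : PvPos) (r : Int) : List PvPos :=
  if pvFree board n r pos.1.2 && pvFree board n r pos.2.2 then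
    [pvNorm pos.1 (r, pos.1.2), pvNorm pos.2 (r, pos.2.2)]
  else []

def pvRVB (board : List (List Int)) (n : Int) (pos : PvPos) (c : Int) : List PvPos :=
  if pvFree board n pos.1.1 c && pvFree board n pos.2.1 c then
    [pvNorm pos.1 (pos.1.1, c), pvNorm pos.2 (pos.2.1, c)]
  else []

theorem nextspotsB_eq_pieces (board : List (List Int)) (n : Int) (pos : PvPos) :
    nextspotsB board pos n =
      (pvTB board n pos (-1, 0) ++ pvTB board n pos (1, 0) ++ pvTB board n pos (0, -1) ++ pvTB board n pos (0, 1)) ++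
      (if pos.1.1 = pos.2.1 then pvRHB board n pos (pos.1.1 - 1) ++ pvRHB board n pos (pos.1.1 + 1)
       else if pos.1.2 = pos.2.2 then pvRVB board n pos (pos.1.2 - 1) ++ pvRVB board n pos (pos.1.2 + 1)
       else []) := by
  unfold nextspotsB pvTB pvRHB pvRVB
  simp only [List.foldl_cons, List.foldl_nil, ite_acc1]
  by_cases hx : pos.1.1 = pos.2.1
  · rw [if_pos hx, if_pos hx]
    simp [List.append_assoc]
  · rw [if_neg hx, if_neg hx]
    by_cases hy : pos.1.2 = pos.2.2
    · rw [if_pos hy, if_pos hy]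
      simp [List.append_assoc]
    · rw [if_neg hy, if_neg hy]
      simp [List.append_assoc]

-- pvMk facts
theorem pvMk_cases (a b : Int × Int) : pvMk a b = (a, b) ∨ pvMk a b = (b, a) := by
  unfold pvMk; split_ifs <;> simp

theorem pvMk_idem (a b : Int × Int) : pvMk (pvMk a b).1 (pvMk a b).2 = pvMk a b := by
  obtain ⟨a1, a2⟩ := a; obtain ⟨b1, b2⟩ := b
  simp only [pvMk]
  split_ifs <;> simp_all <;> omega

theorem pvMk_shift (p : PvPos) (h : pvMk p.1 p.2 = p) (d : Int × Int) :
    pvMk (p.1.1 + d.1, p.1.2 + d.2) (p.2.1 + d.1, p.2.2 + d.2) =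
      ((p.1.1 + d.1, p.1.2 + d.2), (p.2.1 + d.1, p.2.2 + d.2)) := by
  obtain ⟨⟨a1, a2⟩, ⟨b1, b2⟩⟩ := p; obtain ⟨d1, d2⟩ := d
  simp only [pvMk] at h ⊢
  split_ifs at h ⊢ <;> simp only [Prod.mk.injEq] at h ⊢ <;> omega

theorem pvNorm_eq_pvMk : pvNorm = pvMk := rfl

theorem pvTB_eq_pvTA (board : List (List Int)) (n : Int) (pos : PvPos)
    (h : pvMk pos.1 pos.2 = pos) (d : Int × Int) :
    pvTB board n pos d = pvTA board n pos d := by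
  unfold pvTB pvTA pvFree
  have hmk := pvMk_shift pos h d
  split_ifs with h1 h2 h3 <;>
    first
      | rfl
      | rw [hmk]
      | (exfalso; simp only [Bool.and_eq_true, decide_eq_true_eq] at *; tauto)

theorem pvRHB_eq_pvRH (board : List (List Int)) (n : Int) (pos : PvPos)
    (hok : pvOk n pos) (hx : pos.1.1 = pos.2.1) (i : Int) :
    pvRHB board n pos (pos.1.1 + i) = pvRH board n pos i := by
  obtain ⟨⟨hb1, hb2, hb3, hb4, hb5, hb6, hb7, hb8⟩, -⟩ := hok
  unfold pvRHB pvRH pvFree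
  simp only [pvNorm_eq_pvMk, ← hx]
  split_ifs with h1 h2 h3 <;>
    first
      | rfl
      | (exfalso; simp only [Bool.and_eq_true, decide_eq_true_eq] at *; tauto)

theorem pvRVB_eq_pvRV (board : List (List Int)) (n : Int) (pos : PvPos)
    (hok : pvOk n pos) (hy : pos.1.2 = pos.2.2) (i : Int) :
    pvRVB board n pos (pos.1.2 + i) = pvRV board n pos i := by
  obtain ⟨⟨hb1, hb2, hb3, hb4, hb5, hb6, hb7, hb8⟩, -⟩ := hok
  unfold pvRVB pvRV pvFree
  simp only [pvNorm_eq_pvMk, ← hy]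
  split_ifs with h1 h2 h3 <;>
    first
      | rfl
      | (exfalso; simp only [Bool.and_eq_true, decide_eq_true_eq] at *; tauto)

theorem nextspots_eq (board : List (List Int)) (n : Int) (pos : PvPos) (hok : pvOk n pos) :
    nextspotsB board pos n = nextspotsA board pos n := by
  rw [nextspotsB_eq_pieces, nextspotsA_eq_nbrs]
  unfold pvNbrs
  rw [pvTB_eq_pvTA board n pos hok.2 (-1, 0), pvTB_eq_pvTA board n pos hok.2 (1, 0),
    pvTB_eq_pvTA board n pos hok.2 (0, -1), pvTB_eq_pvTA board n pos hok.2 (0, 1)]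
  congr 1
  by_cases hx : pos.1.1 = pos.2.1
  · rw [if_pos hx, if_pos hx, show pos.1.1 - 1 = pos.1.1 + (-1) from by ring,
      pvRHB_eq_pvRH board n pos hok hx (-1), pvRHB_eq_pvRH board n pos hok hx 1]
  · rw [if_neg hx, if_neg hx]
    by_cases hy : pos.1.2 = pos.2.2
    · rw [if_pos hy, if_pos hy, show pos.1.2 - 1 = pos.1.2 + (-1) from by ring,
        pvRVB_eq_pvRV board n pos hok hy (-1), pvRVB_eq_pvRV board n pos hok hy 1]
    · rw [if_neg hy, if_neg hy]

-- every generated neighbour of an ok state is ok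
theorem pvMk_ok (n : Int) (a b : Int × Int)
    (ha : 0 ≤ a.1 ∧ a.1 < n ∧ 0 ≤ a.2 ∧ a.2 < n) (hb : 0 ≤ b.1 ∧ b.1 < n ∧ 0 ≤ b.2 ∧ b.2 < n) :
    pvOk n (pvMk a b) := by
  constructor
  · rcases pvMk_cases a b with h | h <;> rw [h] <;> tauto
  · exact pvMk_idem a b

theorem pvTA_ok (board : List (List Int)) (n : Int) (pos : PvPos) (d : Int × Int) :
    ∀ x ∈ pvTA board n pos d, pvOk n x := by
  intro x hx
  unfold pvTA at hx
  split_ifs at hx with h1 h2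
  · rw [List.mem_singleton] at hx
    subst hx
    exact pvMk_ok n _ _ (by first | tauto | (simp; tauto)) (by first | tauto | (simp; tauto))
  · simp at hx
  · simp at hx

theorem pvRH_ok (board : List (List Int)) (n : Int) (pos : PvPos) (hok : pvOk n pos) (i : Int) :
    ∀ x ∈ pvRH board n pos i, pvOk n x := by
  intro x hx
  obtain ⟨⟨hb1, hb2, hb3, hb4, hb5, hb6, hb7, hb8⟩, -⟩ := hok
  unfold pvRH at hx
  split_ifs at hx with h1 h2
  · simp only [List.mem_cons, List.mem_singleton, List.not_mem_nil, or_false] at hx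
    rcases hx with hx | hx <;>
      (rw [hx]; exact pvMk_ok n _ _ (by first | tauto | (simp; tauto)) (by first | tauto | (simp; tauto)))
  · simp at hx
  · simp at hx

theorem pvRV_ok (board : List (List Int)) (n : Int) (pos : PvPos) (hok : pvOk n pos) (i : Int) :
    ∀ x ∈ pvRV board n pos i, pvOk n x := by
  intro x hx
  obtain ⟨⟨hb1, hb2, hb3, hb4, hb5, hb6, hb7, hb8⟩, -⟩ := hok
  unfold pvRV at hx
  split_ifs at hx with h1 h2
  · simp only [List.mem_cons, List.mem_singleton, List.not_mem_nil, or_false] at hx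
    rcases hx with hx | hx <;>
      (rw [hx]; exact pvMk_ok n _ _ (by first | tauto | (simp; tauto)) (by first | tauto | (simp; tauto)))
  · simp at hx
  · simp at hx

theorem nextspotsA_ok (board : List (List Int)) (n : Int) (pos : PvPos) (hok : pvOk n pos) :
    ∀ x ∈ nextspotsA board pos n, pvOk n x := by
  intro x hx
  rw [nextspotsA_eq_nbrs] at hx
  unfold pvNbrs at hx
  simp only [List.mem_append] at hx
  rcases hx with (((h | h) | h) | h) | h
  · exact pvTA_ok board n pos _ x h
  · exact pvTA_ok board n pos _ x h
  · exact pvTA_ok board n pos _ x h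
  · exact pvTA_ok board n pos _ x h
  · split_ifs at h with hx1 hy1
    · rcases List.mem_append.mp h with h | h
      · exact pvRH_ok board n pos hok _ x h
      · exact pvRH_ok board n pos hok _ x h
    · rcases List.mem_append.mp h with h | h
      · exact pvRV_ok board n pos hok _ x h
      · exact pvRV_ok board n pos hok _ x h
    · simp at h

theorem pvCell_mem (n : Int) (c : Int × Int) (h1 : 0 ≤ c.1) (h2 : c.1 < n) (h3 : 0 ≤ c.2)
    (h4 : c.2 < n) : c ∈ pvCells n := by
  apply List.mem_flatMap.mpr
  refine ⟨c.1, ?_, ?_⟩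
  · rw [PySem.List.mem_pyRange_one]; omega
  · apply List.mem_map.mpr
    exact ⟨c.2, by rw [PySem.List.mem_pyRange_one]; omega, rfl⟩

theorem pvOk_mem_pvAll (n : Int) (x : PvPos) (h : pvOk n x) : x ∈ pvAll n := by
  obtain ⟨⟨h1, h2, h3, h4, h5, h6, h7, h8⟩, -⟩ := h
  simp only [pvAll, List.mem_flatMap, List.mem_map]
  exact ⟨x.1, pvCell_mem n x.1 h1 h2 h3 h4, x.2, pvCell_mem n x.2 h5 h6 h7 h8, rfl⟩

-- fold bookkeeping
theorem foldS_prefix (l : List PvPos) : ∀ (q a v : List PvPos),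
    l.foldl pvSbody (q ++ a, v) = (q ++ (l.foldl pvSbody (a, v)).1, (l.foldl pvSbody (a, v)).2) := by
  induction l with
  | nil => intro q a v; simp
  | cons x l ih =>
    intro q a v
    by_cases hx : x ∈ v
    · simp only [List.foldl_cons, pvSbody, if_pos hx]
      exact ih q a v
    · simp only [List.foldl_cons, pvSbody, if_neg hx, List.append_assoc]
      exact ih q (a ++ [x]) (v ++ [x])

-- the visited component of pvSbody evolves like the pvAdd fold
theorem foldS_snd (l : List PvPos) : ∀ (a v : List PvPos),
    (l.foldl pvSbody (a, v)).2 = l.foldl pvAdd v := by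
  induction l with
  | nil => intro a v; rfl
  | cons x l ih =>
    intro a v
    by_cases hx : x ∈ v
    · simp only [List.foldl_cons, pvSbody, pvAdd, if_pos hx]
      exact ih a v
    · simp only [List.foldl_cons, pvSbody, pvAdd, if_neg hx]
      exact ih (a ++ [x]) (v ++ [x])

-- the visited component of a whole-layer expansion is B's round fold
theorem expand_snd (board : List (List Int)) (n : Int) (pend : List PvPos) :
    ∀ (a v : List PvPos),
    (pvExpand board n pend (a, v)).2 = pend.foldl (pvStep board n) v := by
  induction pend with
  | nil => intro a v; rfl
  | cons p pend ih =>
    intro a v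
    simp only [pvExpand, List.foldl_cons]
    have h : List.foldl pvSbody (a, v) (nextspotsA board p n)
        = ((List.foldl pvSbody (a, v) (nextspotsA board p n)).1, List.foldl pvAdd v (nextspotsA board p n)) := by
      rw [← foldS_snd]
    rw [h]
    have := ih (List.foldl pvSbody (a, v) (nextspotsA board p n)).1
      (List.foldl pvAdd v (nextspotsA board p n))
    simpa [pvExpand, pvStep] using this

-- pvAdd fold: monotone in the accumulator, contains the list, absorbs a contained list
theorem mem_foldl_pvAdd_init (l : List PvPos) : ∀ (v : List PvPos) (x : PvPos),
    x ∈ v → x ∈ l.foldl pvAdd v := by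
  induction l with
  | nil => intro v x hx; exact hx
  | cons y l ih =>
    intro v x hx
    refine ih (pvAdd v y) x ?_
    unfold pvAdd
    split_ifs <;> simp [hx]

theorem mem_foldl_pvAdd_list (l : List PvPos) : ∀ (v : List PvPos) (x : PvPos),
    x ∈ l → x ∈ l.foldl pvAdd v := by
  induction l with
  | nil => intro v x hx; simp at hx
  | cons y l ih =>
    intro v x hx
    rcases List.mem_cons.mp hx with rfl | hx
    · simp only [List.foldl_cons]
      refine mem_foldl_pvAdd_init l (pvAdd v x) x ?_
      unfold pvAdd
      split_ifs with h <;> simp [h]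
    · exact ih _ x hx

theorem foldl_pvAdd_absorb (l : List PvPos) : ∀ (v : List PvPos),
    (∀ x ∈ l, x ∈ v) → l.foldl pvAdd v = v := by
  induction l with
  | nil => intro v _; rfl
  | cons y l ih =>
    intro v h
    have hy : pvAdd v y = v := by unfold pvAdd; rw [if_pos (h y (by simp))]
    simp only [List.foldl_cons, hy]
    exact ih v (fun x hx => h x (by simp [hx]))

theorem mem_foldl_pvStep_init (board : List (List Int)) (n : Int) (f : List PvPos) :
    ∀ (v : List PvPos) (x : PvPos), x ∈ v → x ∈ f.foldl (pvStep board n) v := by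
  induction f with
  | nil => intro v x hx; exact hx
  | cons p f ih =>
    intro v x hx
    exact ih _ x (mem_foldl_pvAdd_init _ v x hx)

theorem foldl_pvStep_closure (board : List (List Int)) (n : Int) (f : List PvPos) :
    ∀ (v : List PvPos) (s : PvPos), s ∈ f → ∀ x ∈ nextspotsA board s n,
      x ∈ f.foldl (pvStep board n) v := by
  induction f with
  | nil => intro v s hs; simp at hs
  | cons p f ih =>
    intro v s hs x hx
    rcases List.mem_cons.mp hs with rfl | hs
    · exact mem_foldl_pvStep_init board n f _ x (mem_foldl_pvAdd_list _ v x hx)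
    · exact ih _ s hs x hx

theorem foldl_pvStep_absorb (board : List (List Int)) (n : Int) (v0 : List PvPos) :
    ∀ (v : List PvPos), (∀ s ∈ v0, ∀ x ∈ nextspotsA board s n, x ∈ v) →
    v0.foldl (pvStep board n) v = v := by
  induction v0 with
  | nil => intro v _; rfl
  | cons p v0 ih =>
    intro v h
    have hp : pvStep board n v p = v :=
      foldl_pvAdd_absorb _ v (fun x hx => h p (by simp) x hx)
    simp only [List.foldl_cons, hp]
    exact ih v (fun s hs x hx => h s (by simp [hs]) x hx)

-- B's round fold (over Set.add and nextspotsB) is the pvStep fold, for ok states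
theorem roundC_eq (board : List (List Int)) (n : Int) (reach : List PvPos) (init : List PvPos)
    (hok : ∀ s ∈ reach, pvOk n s) :
    reach.foldl (fun (acc : PySem.Set PvPos) s =>
        (nextspotsB board s n).foldl (fun a nb => PySem.Set.add a nb) acc) init
      = reach.foldl (pvStep board n) init := by
  apply PySem.List.foldl_congr_mem
  intro acc s hs
  rw [nextspots_eq board n s (hok s hs)]
  unfold pvStep
  apply PySem.List.foldl_congr_mem
  intro a nb _
  rw [PySem.Set.add_eq_ite]
  rfl

-- invariants carried through one layer expansion
theorem foldS_facts (n : Int) (l : List PvPos) : ∀ (a v0 : List PvPos),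
    (∀ x ∈ l, pvOk n x) →
    a.Nodup → (∀ x ∈ a, x ∈ pvAll n ∧ x ∉ v0 ∧ pvOk n x) →
    (l.foldl pvSbody (a, v0 ++ a)).2 = v0 ++ (l.foldl pvSbody (a, v0 ++ a)).1 ∧
    (l.foldl pvSbody (a, v0 ++ a)).1.Nodup ∧
    (∀ x ∈ (l.foldl pvSbody (a, v0 ++ a)).1, x ∈ pvAll n ∧ x ∉ v0 ∧ pvOk n x) := by
  intro a v0
  induction l generalizing a with
  | nil => intro _ hnd hfacts; exact ⟨rfl, hnd, hfacts⟩
  | cons x l ih =>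
    intro hl hnd hfacts
    by_cases hx : x ∈ v0 ++ a
    · simp only [List.foldl_cons, pvSbody, if_pos hx]
      exact ih a (fun y hy => hl y (by simp [hy])) hnd hfacts
    · have hxv0 : x ∉ v0 := fun h => hx (List.mem_append.mpr (Or.inl h))
      have hxa : x ∉ a := fun h => hx (List.mem_append.mpr (Or.inr h))
      simp only [List.foldl_cons, pvSbody, if_neg hx, List.append_assoc]
      exact ih (a ++ [x]) (fun y hy => hl y (by simp [hy]))
        (by
          rw [List.nodup_append]
          refine ⟨hnd, List.nodup_singleton x, ?_⟩
          intro y hy b hb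
          rw [List.mem_singleton] at hb
          subst hb
          exact fun hyb => hxa (hyb ▸ hy))
        (by
          intro y hy
          rcases List.mem_append.mp hy with hy | hy
          · exact hfacts y hy
          · have hyx : y = x := List.mem_singleton.mp hy
            subst hyx
            exact ⟨pvOk_mem_pvAll n y (hl y (by simp)), hxv0, hl y (by simp)⟩)

theorem expand_facts (board : List (List Int)) (n : Int) (pend : List PvPos) :
    ∀ (a v0 : List PvPos), (∀ p ∈ pend, pvOk n p) →
    a.Nodup → (∀ x ∈ a, x ∈ pvAll n ∧ x ∉ v0 ∧ pvOk n x) →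
    (pvExpand board n pend (a, v0 ++ a)).2 = v0 ++ (pvExpand board n pend (a, v0 ++ a)).1 ∧
    (pvExpand board n pend (a, v0 ++ a)).1.Nodup ∧
    (∀ x ∈ (pvExpand board n pend (a, v0 ++ a)).1, x ∈ pvAll n ∧ x ∉ v0 ∧ pvOk n x) := by
  intro a v0
  induction pend generalizing a with
  | nil => intro _ hnd hfacts; exact ⟨rfl, hnd, hfacts⟩
  | cons p pend ih =>
    intro hp hnd hfacts
    have hinner := foldS_facts n (nextspotsA board p n) a v0
      (nextspotsA_ok board n p (hp p (by simp))) hnd hfacts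
    simp only [pvExpand, List.foldl_cons]
    have hr : List.foldl pvSbody (a, v0 ++ a) (nextspotsA board p n)
        = ((List.foldl pvSbody (a, v0 ++ a) (nextspotsA board p n)).1,
           v0 ++ (List.foldl pvSbody (a, v0 ++ a) (nextspotsA board p n)).1) := by
      conv_lhs => rw [← Prod.mk.eta (p := List.foldl pvSbody (a, v0 ++ a) (nextspotsA board p n))]
      rw [hinner.1]
    rw [hr]
    have := ih ((List.foldl pvSbody (a, v0 ++ a) (nextspotsA board p n)).1)
      (fun q hq => hp q (by simp [hq])) hinner.2.1 hinner.2.2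
    simpa [pvExpand] using this

-- counting
theorem length_filter_mono {α : Type} (l : List α) (p q : α → Bool)
    (h : ∀ x, q x = true → p x = true) : (l.filter q).length ≤ (l.filter p).length := by
  induction l with
  | nil => simp
  | cons x l ih =>
    by_cases hq : q x = true
    · simp [List.filter_cons, hq, h x hq]; omega
    · by_cases hp : p x = true <;> simp [List.filter_cons, hq, hp] <;> omega

theorem filter_cons_false {α : Type} (p : α → Bool) (y : α) (l : List α) (h : p y = false) :
    (y :: l).filter p = l.filter p := by simp [List.filter_cons, h]

theorem filter_cons_true {α : Type} (p : α → Bool) (y : α) (l : List α) (h : p y = true) :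
    (y :: l).filter p = y :: l.filter p := by simp [List.filter_cons, h]

theorem missing_drop (n : Int) (x : PvPos) (v : List PvPos) (hx : x ∈ pvAll n) (hnv : x ∉ v) :
    pvMissing n (v ++ [x]) + 1 ≤ pvMissing n v := by
  unfold pvMissing
  have key : ∀ (l : List PvPos), x ∈ l →
      (l.filter (fun y => decide (y ∉ v ++ [x]))).length + 1 ≤
      (l.filter (fun y => decide (y ∉ v))).length := by
    intro l hl
    induction l with
    | nil => simp at hl
    | cons y l ih =>
      by_cases hyx : y = x
      · subst hyx
        have h1 : (decide (y ∉ v ++ [y])) = false := by simp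
        have h2 : (decide (y ∉ v)) = true := by simpa using hnv
        rw [filter_cons_false (fun z => decide (z ∉ v ++ [y])) y l h1,
          filter_cons_true (fun z => decide (z ∉ v)) y l h2, List.length_cons]
        have := length_filter_mono l (fun z => decide (z ∉ v)) (fun z => decide (z ∉ v ++ [y]))
          (by intro z hz; simp at hz ⊢; exact hz.1)
        omega
      · have hl' : x ∈ l := by
          rcases List.mem_cons.mp hl with h | h
          · exact absurd h.symm hyx
          · exact h
        have := ih hl'
        by_cases hyv : y ∈ v
        · have e1 : (decide (y ∉ v ++ [x])) = false := by
            simp [List.mem_append, hyv]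
          have e2 : (decide (y ∉ v)) = false := by simp [hyv]
          rw [filter_cons_false (fun z => decide (z ∉ v ++ [x])) y l e1,
            filter_cons_false (fun z => decide (z ∉ v)) y l e2]
          omega
        · have e1 : (decide (y ∉ v ++ [x])) = true := by
            simp [List.mem_append, hyv, hyx]
          have e2 : (decide (y ∉ v)) = true := by simp [hyv]
          rw [filter_cons_true (fun z => decide (z ∉ v ++ [x])) y l e1,
            filter_cons_true (fun z => decide (z ∉ v)) y l e2, List.length_cons,
            List.length_cons]
          omega
  exact key (pvAll n) hx

theorem missing_news (n : Int) (news : List PvPos) : ∀ (v : List PvPos), news.Nodup →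
    (∀ x ∈ news, x ∈ pvAll n ∧ x ∉ v) →
    pvMissing n (v ++ news) + news.length ≤ pvMissing n v := by
  induction news with
  | nil => intro v _ _; simp
  | cons x rest ih =>
    intro v hnd h
    have hdrop := missing_drop n x v (h x (by simp)).1 (h x (by simp)).2
    have hrest := ih (v ++ [x]) (List.Nodup.of_cons hnd) (by
      intro y hy
      refine ⟨(h y (by simp [hy])).1, ?_⟩
      simp only [List.mem_append, List.mem_singleton]
      rintro (hyv | rfl)
      · exact (h y (by simp [hy])).2 hyv
      · exact (List.nodup_cons.mp hnd).1 hy)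
    have e : v ++ x :: rest = (v ++ [x]) ++ rest := by simp
    rw [e, List.length_cons]
    omega

theorem missing_le (n : Int) (v : List PvPos) : pvMissing n v ≤ (pvAll n).length :=
  List.length_filter_le _ _

theorem foldA_eq (c : Int) (l : List PvPos) : ∀ (q : List (PvPos × Int)) (v : List PvPos),
    l.foldl (fun (st : List (PvPos × Int) × List PvPos) ns =>
        if ns ∈ st.2 then st else (st.1 ++ [(ns, c)], st.2 ++ [ns])) (q, v)
      = (q ++ ((l.foldl pvSbody ([], v)).1.map (fun p => (p, c))), (l.foldl pvSbody ([], v)).2) := by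
  induction l with
  | nil => intro q v; simp
  | cons x l ih =>
    intro q v
    by_cases hx : x ∈ v
    · simp only [List.foldl_cons, pvSbody, if_pos hx]
      exact ih q v
    · simp only [List.foldl_cons, pvSbody, if_neg hx]
      rw [ih (q ++ [(x, c)]) (v ++ [x])]
      simp only [List.nil_append]
      have h2 : List.foldl pvSbody ([x], v ++ [x]) l =
          ([x] ++ (List.foldl pvSbody ([], v ++ [x]) l).1, (List.foldl pvSbody ([], v ++ [x]) l).2) := by
        have := foldS_prefix l [x] [] (v ++ [x])
        simpa using this
      rw [h2]
      simp

-- A processes one whole layer of its queue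
theorem loopA_layer (board : List (List Int)) (n : Int) (pend : List PvPos) :
    ∀ (nxt visit : List PvPos) (d : Int) (fuel : Nat),
    loopA board n (pend.length + fuel) (pend.map (fun p => (p, d)) ++ nxt.map (fun p => (p, d + 1))) visit
      = if pend.any (pvIsGoal n) then d
        else loopA board n fuel ((pvExpand board n pend (nxt, visit)).1.map (fun p => (p, d + 1)))
               (pvExpand board n pend (nxt, visit)).2 := by
  induction pend with
  | nil =>
    intro nxt visit d fuel
    simp [pvExpand]
  | cons p pend ih =>
    intro nxt visit d fuel
    have hlen : (p :: pend).length + fuel = (pend.length + fuel) + 1 := by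
      simp [List.length_cons]; omega
    rw [hlen]
    simp only [List.map_cons, List.cons_append]
    rw [show loopA board n ((pend.length + fuel) + 1)
        ((p, d) :: (pend.map (fun p => (p, d)) ++ nxt.map (fun p => (p, d + 1)))) visit
      = if p.1 = (n - 1, n - 1) ∨ p.2 = (n - 1, n - 1) then d
        else
          loopA board n (pend.length + fuel)
            ((nextspotsA board p n).foldl
              (fun (st : List (PvPos × Int) × List PvPos) ns =>
                if ns ∈ st.2 then st else (st.1 ++ [(ns, d + 1)], st.2 ++ [ns]))
              (pend.map (fun p => (p, d)) ++ nxt.map (fun p => (p, d + 1)), visit)).1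
            ((nextspotsA board p n).foldl
              (fun (st : List (PvPos × Int) × List PvPos) ns =>
                if ns ∈ st.2 then st else (st.1 ++ [(ns, d + 1)], st.2 ++ [ns]))
              (pend.map (fun p => (p, d)) ++ nxt.map (fun p => (p, d + 1)), visit)).2
      from rfl]
    by_cases hg : p.1 = (n - 1, n - 1) ∨ p.2 = (n - 1, n - 1)
    · rw [if_pos hg]
      have : (p :: pend).any (pvIsGoal n) = true := by
        simp only [List.any_cons, Bool.or_eq_true, pvIsGoal]
        exact Or.inl (decide_eq_true hg)
      rw [this, if_pos rfl]
    · rw [if_neg hg]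
      rw [foldA_eq (d + 1) (nextspotsA board p n)
        (pend.map (fun p => (p, d)) ++ nxt.map (fun p => (p, d + 1))) visit]
      have hq : (pend.map (fun p => (p, d)) ++ nxt.map (fun p => (p, d + 1))) ++
            ((List.foldl pvSbody ([], visit) (nextspotsA board p n)).1.map (fun p => (p, d + 1)))
          = pend.map (fun p => (p, d)) ++
            (nxt ++ (List.foldl pvSbody ([], visit) (nextspotsA board p n)).1).map
              (fun p => (p, d + 1)) := by
        simp [List.map_append, List.append_assoc]
      rw [hq, ih (nxt ++ (List.foldl pvSbody ([], visit) (nextspotsA board p n)).1)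
        (List.foldl pvSbody ([], visit) (nextspotsA board p n)).2 d fuel]
      have hexp : pvExpand board n (p :: pend) (nxt, visit)
          = pvExpand board n pend
              (nxt ++ (List.foldl pvSbody ([], visit) (nextspotsA board p n)).1,
               (List.foldl pvSbody ([], visit) (nextspotsA board p n)).2) := by
        simp only [pvExpand, List.foldl_cons]
        congr 1
        have := foldS_prefix (nextspotsA board p n) nxt [] visit
        simpa using this
      rw [hexp]
      have hany : (p :: pend).any (pvIsGoal n) = pend.any (pvIsGoal n) := by
        simp only [List.any_cons, pvIsGoal]
        rw [decide_eq_false hg]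
        simp
      rw [hany]

-- the two loops agree given enough fuel
theorem pv_corr (board : List (List Int)) (n : Int) (fC : Nat) :
    ∀ (v0 f : List PvPos) (d : Int) (fA : Nat),
    (∀ p ∈ v0 ++ f, pvOk n p) →
    (∀ p ∈ v0, ¬(p.1 = (n - 1, n - 1) ∨ p.2 = (n - 1, n - 1))) →
    (∀ s ∈ v0, ∀ x ∈ nextspotsA board s n, x ∈ v0 ++ f) →
    2 * pvMissing n (v0 ++ f) + f.length + 1 ≤ fA →
    pvMissing n (v0 ++ f) + 2 ≤ fC →
    loopA board n fA (f.map (fun p => (p, d))) (v0 ++ f) = loopC board n fC (v0 ++ f) d := by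
  induction fC with
  | zero => intro v0 f d fA _ _ _ _ hfC; omega
  | succ fC ih =>
    intro v0 f d fA hok hgf hclo hfA hfC
    have hC : loopC board n (fC + 1) (v0 ++ f) d
        = if (v0 ++ f).any (pvIsGoal n) then d
          else
            if ((v0 ++ f).foldl (fun (acc : PySem.Set PvPos) s =>
                  (nextspotsB board s n).foldl (fun a nb => PySem.Set.add a nb) acc) (v0 ++ f)).length
                = (v0 ++ f).length then 0
            else loopC board n fC
              ((v0 ++ f).foldl (fun (acc : PySem.Set PvPos) s =>
                  (nextspotsB board s n).foldl (fun a nb => PySem.Set.add a nb) acc) (v0 ++ f))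
              (d + 1) := rfl
    rw [hC]
    have hv0any : v0.any (pvIsGoal n) = false := by
      apply List.any_eq_false.mpr
      intro p hp
      simpa [pvIsGoal] using hgf p hp
    have hanysplit : (v0 ++ f).any (pvIsGoal n) = f.any (pvIsGoal n) := by
      rw [List.any_append, hv0any, Bool.false_or]
    obtain ⟨f', hfsplit, hf'⟩ : ∃ f', fA = f.length + f' ∧ 2 * pvMissing n (v0 ++ f) + 1 ≤ f' :=
      ⟨fA - f.length, by omega, by omega⟩
    rw [hfsplit]
    have hL := loopA_layer board n f [] (v0 ++ f) d f'
    simp only [List.map_nil, List.append_nil] at hL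
    rw [hL, hanysplit]
    by_cases hg : f.any (pvIsGoal n) = true
    · rw [if_pos hg, if_pos hg]
    · rw [if_neg hg, if_neg hg]
      -- B's round equals the visited part of A's layer expansion
      have hround : (v0 ++ f).foldl (fun (acc : PySem.Set PvPos) s =>
              (nextspotsB board s n).foldl (fun a nb => PySem.Set.add a nb) acc) (v0 ++ f)
            = (pvExpand board n f ([], v0 ++ f)).2 := by
        rw [roundC_eq board n (v0 ++ f) (v0 ++ f) hok, List.foldl_append,
          foldl_pvStep_absorb board n v0 (v0 ++ f) hclo, ← expand_snd board n f []]
      rw [hround]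
      have hfacts := expand_facts board n f [] (v0 ++ f)
        (fun p hp => hok p (List.mem_append.mpr (Or.inr hp))) List.nodup_nil (by simp)
      simp only [List.append_nil] at hfacts
      obtain ⟨h1, h2, h3⟩ := hfacts
      have hmiss := missing_news n (pvExpand board n f ([], v0 ++ f)).1 (v0 ++ f) h2
        (fun x hx => ⟨(h3 x hx).1, (h3 x hx).2.1⟩)
      by_cases hnews : (pvExpand board n f ([], v0 ++ f)).1 = []
      · -- fixpoint reached: both loops return 0
        obtain ⟨m, rfl⟩ : ∃ m, f' = m + 1 := ⟨f' - 1, by omega⟩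
        rw [h1, hnews]
        simp [loopA]
      · have hlen : 0 < (pvExpand board n f ([], v0 ++ f)).1.length :=
          List.length_pos_iff.mpr hnews
        have hne : (pvExpand board n f ([], v0 ++ f)).2.length ≠ (v0 ++ f).length := by
          rw [h1, List.length_append]; omega
        rw [if_neg hne, h1]
        have hgff : ∀ p ∈ f, ¬(p.1 = (n - 1, n - 1) ∨ p.2 = (n - 1, n - 1)) := by
          intro p hp
          have := List.any_eq_false.mp (Bool.eq_false_iff.mpr hg) p hp
          simpa [pvIsGoal] using this
        have := ih (v0 ++ f) (pvExpand board n f ([], v0 ++ f)).1 (d + 1) f'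
          (by
            intro p hp
            rcases List.mem_append.mp hp with hp | hp
            · exact hok p hp
            · exact (h3 p hp).2.2)
          (by
            intro p hp
            rcases List.mem_append.mp hp with hp | hp
            · exact hgf p hp
            · exact hgff p hp)
          (by
            intro s hs x hx
            rcases List.mem_append.mp hs with hs | hs
            · exact List.mem_append.mpr (Or.inl (hclo s hs x hx))
            · rw [← h1, expand_snd board n f []]
              exact foldl_pvStep_closure board n f (v0 ++ f) s hs x hx)
          (by omega)
          (by omega)
        exact this

-- ===== VERDICT (by name: the statement is the Claim_ definition above) =====
theorem solution_spec : Claim_equal_solution := by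
  unfold Claim_equal_solution Spec_solution
  intro board _ _
  match board with
  | [] => decide
  | [r] =>
    have hA : solution [r] = 0 := by
      show loopA [r] 1 (2 * (pvAll 1).length + 2) [((((0:Int),(0:Int)),((0:Int),(1:Int))), 0)]
        [(((0:Int),(0:Int)),((0:Int),(1:Int)))] = 0
      rw [show 2 * (pvAll 1).length + 2 = 3 + 1 from by decide]
      simp only [loopA]
      rw [if_pos (Or.inl (by norm_num))]
    have hB : solution_alt [r] = 0 := by
      show loopC [r] 1 ((pvAll 1).length + 2)
        (PySem.Set.ofList [(((0:Int),(0:Int)),((0:Int),(1:Int)))]) 0 = 0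
      rw [show (pvAll 1).length + 2 = 2 + 1 from by decide,
        show PySem.Set.ofList [((((0:Int),(0:Int)),((0:Int),(1:Int))) : PvPos)]
          = [(((0:Int),(0:Int)),((0:Int),(1:Int)))] from by decide]
      simp only [loopC]
      rw [if_pos (by simp)]
    rw [hA, hB]
  | r1 :: r2 :: rest =>
    have hn : (2 : Int) ≤ ((r1 :: r2 :: rest).length : Int) := by simp; omega
    show loopA (r1 :: r2 :: rest) ((r1 :: r2 :: rest).length : Int)
        (2 * (pvAll ((r1 :: r2 :: rest).length : Int)).length + 2)
        [((((0:Int),(0:Int)),((0:Int),(1:Int))), 0)] [(((0:Int),(0:Int)),((0:Int),(1:Int)))]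
      = loopC (r1 :: r2 :: rest) ((r1 :: r2 :: rest).length : Int)
        ((pvAll ((r1 :: r2 :: rest).length : Int)).length + 2)
        (PySem.Set.ofList [(((0:Int),(0:Int)),((0:Int),(1:Int)))]) 0
    have hofl : PySem.Set.ofList [((((0:Int),(0:Int)),((0:Int),(1:Int))) : PvPos)]
        = [(((0:Int),(0:Int)),((0:Int),(1:Int)))] := by decide
    rw [hofl]
    have hcorr := pv_corr (r1 :: r2 :: rest) ((r1 :: r2 :: rest).length : Int)
      ((pvAll ((r1 :: r2 :: rest).length : Int)).length + 2)
      [] [(((0:Int),(0:Int)),((0:Int),(1:Int)))] 0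
      (2 * (pvAll ((r1 :: r2 :: rest).length : Int)).length + 2)
      (by
        intro p hp
        rw [List.nil_append, List.mem_singleton] at hp
        subst hp
        refine ⟨?_, by decide⟩
        simp <;> omega)
      (by intro p hp; simp at hp)
      (by intro s hs; simp at hs)
      (by
        have := missing_le ((r1 :: r2 :: rest).length : Int)
          ([] ++ [(((0:Int),(0:Int)),((0:Int),(1:Int)))])
        simp only [List.length_singleton]
        omega)
      (by
        have := missing_le ((r1 :: r2 :: rest).length : Int)
          ([] ++ [(((0:Int),(0:Int)),((0:Int),(1:Int)))])
        omega)
    simpa using hcorr
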